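-- pv_equiv track=rewrite | github.com/mzoesch/SymProg | 20221206/hw08_text_search/comprehensions.py | div_less
-- ===== SOURCE A (Python) =====
-- def div_less(set1):
--     """
--     Return a new set only containing numbers that can`t be divided by any other number (except itself and 1)
--     from the original set.
--     """
--
--     # return None  # TODO: replace
--
--     return {
--         i
--         for i in set1
--         if all(
--             i % j != 0
--             for j in set1
--             if j != i and j != 1
--         )
--     }
-- ===== SOURCE B (Python) =====
-- def div_less(set1):
--     members = set(set1)
--
--     def keep(i):
--         if i == 0:
--             return all(j == 0 or j == 1 for j in members)
--         n = abs(i)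
--         d = 1
--         while d * d <= n:
--             if n % d == 0:
--                 for c in (d, -d, n // d, -(n // d)):
--                     if c in members and c != i and c != 1:
--                         return False
--             d += 1
--         return True
--
--     return {i for i in members if keep(i)}
-- ===== Notes on version B (the rewrite author's own statement) =====
-- stated objective: faster
-- what changed: B deduplicates the input into a hash set once and, for each element, trial-divides only up to sqrt(|i|), testing the four candidate divisors d, -d, |i|//d, -(|i|//d) for membership in the set, instead of A's all-pairs modulo scan; per-element work becomes O(sqrt(|i|)) set lookups instead of an O(n) scan.
-- crash fix: A raises ZeroDivisionError whenever set1 contains 0 together with a nonzero element (the generator computes i % 0); B returns the set with 0 dropped and the remaining elements judged normally. — e.g. on div_less([0, 2]): A raises ZeroDivisionError, B returns [2]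
import Mathlib
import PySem

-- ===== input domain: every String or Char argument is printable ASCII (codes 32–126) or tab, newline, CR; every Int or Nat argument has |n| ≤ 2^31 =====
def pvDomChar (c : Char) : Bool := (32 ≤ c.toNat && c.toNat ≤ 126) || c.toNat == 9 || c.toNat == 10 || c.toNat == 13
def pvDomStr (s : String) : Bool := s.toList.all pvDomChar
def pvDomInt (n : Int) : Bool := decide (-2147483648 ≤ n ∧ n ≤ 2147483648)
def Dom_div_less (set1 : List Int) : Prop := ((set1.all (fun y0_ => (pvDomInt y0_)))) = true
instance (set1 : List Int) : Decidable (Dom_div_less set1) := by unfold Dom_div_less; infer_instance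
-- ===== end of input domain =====

-- B replaces A's all-pairs divisibility scan by per-element trial division up to sqrt(|i|) with
-- membership tests in a prebuilt set (objective: faster; measured faster in a timing run).

-- ===== PORT A =====
-- the comprehension's inner filter+all, named so the proofs can speak about it
def pvPredA (set1 : List Int) (i : Int) : Bool :=
  (set1.filter (fun j => j != i && j != 1)).all (fun j => PySem.Int.mod i j != 0)

def div_less (set1 : List Int) : List Int :=
  PySem.Set.ofList (set1.filter (fun i => pvPredA set1 i))

-- ===== PORT B =====
-- the four candidate divisors (d, -d, n//d, -(n//d)) examined for a divisor d of n
def pvCands (n d : Nat) : List Int :=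
  [(d : Int), -(d : Int), ((n / d : Nat) : Int), -((n / d : Nat) : Int)]

-- B's `while d * d <= n` trial-division loop, with an explicit fuel making the recursion
-- structural (fuel n + 1 is enough: the loop stops once d * d > n, and d starts at 1):
-- true iff some nontrivial divisor of i lies in members
def pvLoop (members : List Int) (i : Int) (n : Nat) : Nat → Nat → Bool
  | 0, _ => false
  | fuel + 1, d =>
    if d * d ≤ n then
      (if n % d = 0 then
        (pvCands n d).any (fun c => members.contains c && c != i && c != 1)
       else false) || pvLoop members i n fuel (d + 1)
    else false

def pvKeep (members : List Int) (i : Int) : Bool :=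
  if i = 0 then members.all (fun j => j == 0 || j == 1)
  else !(pvLoop members i i.natAbs (i.natAbs + 1) 1)

def div_less_alt (set1 : List Int) : List Int :=
  let members := PySem.Set.ofList set1
  members.filter (fun i => pvKeep members i)

-- ===== PRECONDITION & SPEC =====
-- Pre_ excludes exactly the inputs on which A raises ZeroDivisionError: a list containing 0
-- together with some nonzero element (the generator `i % j` hits j = 0 there).
def Pre_div_less (set1 : List Int) : Prop := (0:Int) ∈ set1 → ∀ x ∈ set1, x = 0
instance (set1 : List Int) : Decidable (Pre_div_less set1) := by unfold Pre_div_less; infer_instance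
def pvWitness_div_less : List Int := [2, 3, 4, -2]

-- A raises ZeroDivisionError whenever set1 contains 0 alongside a nonzero element; B returns the
-- set with 0 dropped (0 is divisible by that nonzero element) and the others judged normally.
def Raises_div_less (set1 : List Int) : Prop := (0:Int) ∈ set1 ∧ ∃ x ∈ set1, x ≠ 0
instance (set1 : List Int) : Decidable (Raises_div_less set1) := by unfold Raises_div_less; infer_instance
def pvRaiseWitness_div_less : List Int := [0, 2]
def pvRaiseWitnessOut_div_less : List Int := [2]

def Spec_div_less (set1 : List Int) (out : List Int) : Prop := out = div_less_alt set1
instance (set1 : List Int) (out : List Int) : Decidable (Spec_div_less set1 out) := by unfold Spec_div_less; infer_instance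

-- ===== CLAIM (what is proved, stated in full; the proofs are below) =====
def Claim_equal_div_less : Prop := ∀ (set1 : List Int), Dom_div_less set1 → Pre_div_less set1 → Spec_div_less set1 (div_less set1)
def Claim_raises_div_less : Prop := (∀ (set1 : List Int), Dom_div_less set1 → Raises_div_less set1 → ¬ Pre_div_less set1) ∧ (Dom_div_less (pvRaiseWitness_div_less) ∧ Raises_div_less (pvRaiseWitness_div_less) ∧ div_less_alt (pvRaiseWitness_div_less) = pvRaiseWitnessOut_div_less)

-- ===== LEMMAS AND PROOFS =====

-- set-comprehension over a filtered list = filtering the deduplicated set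
theorem pv_ofList_filter (p : Int → Bool) (l : List Int) :
    PySem.Set.ofList (l.filter p) = (PySem.Set.ofList l).filter p := by
  induction l with
  | nil => rfl
  | cons x xs ih =>
    by_cases hp : p x = true
    · rw [List.filter_cons_of_pos hp, PySem.Set.ofList_cons, PySem.Set.ofList_cons,
        List.filter_cons_of_pos hp, ih]
      simp only [PySem.Set.discard, List.filter_filter]
      exact congrArg (x :: ·) (List.filter_congr (fun y _ => by rw [Bool.and_comm]))
    · rw [List.filter_cons_of_neg (by simp [hp]), PySem.Set.ofList_cons,
        List.filter_cons_of_neg (by simp [hp]), ih]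
      simp only [PySem.Set.discard, List.filter_filter]
      refine List.filter_congr (fun y _ => ?_)
      by_cases hyx : y = x
      · subst hyx; simp [hp]
      · simp [hyx]

theorem pvPredA_iff (set1 : List Int) (i : Int) :
    pvPredA set1 i = true ↔ ∀ j ∈ set1, j ≠ i → j ≠ 1 → ¬ (j ∣ i) := by
  simp only [pvPredA, List.all_eq_true, List.mem_filter, Bool.and_eq_true, bne_iff_ne,
    and_imp]
  constructor
  · intro h j hj hji hj1 hdvd
    have := h j hj hji hj1
    exact this ((PySem.Int.mod_eq_zero_iff_dvd i j).mpr hdvd)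
  · intro h j hj hji hj1 hmod
    exact h j hj hji hj1 ((PySem.Int.mod_eq_zero_iff_dvd i j).mp hmod)

theorem pvLoop_iff_aux (S : List Int) (i : Int) (n : Nat) :
    ∀ (fuel d : Nat), n + 1 - d ≤ fuel →
    (pvLoop S i n fuel d = true ↔
      ∃ e, d ≤ e ∧ e * e ≤ n ∧ n % e = 0 ∧
        ∃ c ∈ pvCands n e, c ∈ S ∧ c ≠ i ∧ c ≠ 1) := by
  intro fuel
  induction fuel with
  | zero =>
    intro d hd
    have h0 : pvLoop S i n 0 d = false := rfl
    rw [h0]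
    simp only [Bool.false_eq_true, false_iff]
    rintro ⟨e, hde, hee, -⟩
    have he2 : d ≤ e * e := by
      rcases Nat.eq_zero_or_pos e with rfl | hpos
      · omega
      · exact le_trans hde (Nat.le_mul_of_pos_left e hpos)
    omega
  | succ fuel ih =>
    intro d hd
    simp only [pvLoop]
    by_cases hdd : d * d ≤ n
    · rw [if_pos hdd, Bool.or_eq_true, ih (d + 1) (by omega)]
      constructor
      · rintro (hhit | ⟨e, hde, he⟩)
        · refine ⟨d, le_refl d, hdd, ?_⟩
          by_cases hmod : n % d = 0
          · rw [if_pos hmod] at hhit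
            simp only [List.any_eq_true, Bool.and_eq_true, bne_iff_ne,
              List.contains_iff_mem] at hhit
            obtain ⟨c, hc, ⟨hcS, hci⟩, hc1⟩ := hhit
            exact ⟨hmod, c, hc, hcS, hci, hc1⟩
          · rw [if_neg hmod] at hhit; exact absurd hhit (by decide)
        · exact ⟨e, by omega, he⟩
      · rintro ⟨e, hde, hee, hmod, c, hc, hcS, hci, hc1⟩
        rcases Nat.eq_or_lt_of_le hde with rfl | hlt
        · left
          rw [if_pos hmod]
          simp only [List.any_eq_true, Bool.and_eq_true, bne_iff_ne,
            List.contains_iff_mem]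
          exact ⟨c, hc, ⟨hcS, hci⟩, hc1⟩
        · exact Or.inr ⟨e, by omega, hee, hmod, c, hc, hcS, hci, hc1⟩
    · rw [if_neg hdd]
      simp only [Bool.false_eq_true, false_iff]
      rintro ⟨e, hde, hee, -⟩
      exact hdd (le_trans (Nat.mul_le_mul hde hde) hee)

theorem pvLoop_iff (S : List Int) (i : Int) (hi : i ≠ 0) :
    pvLoop S i i.natAbs (i.natAbs + 1) 1 = true ↔ ∃ j ∈ S, j ≠ i ∧ j ≠ 1 ∧ j ∣ i := by
  have hnpos : 0 < i.natAbs := Int.natAbs_pos.mpr hi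
  rw [pvLoop_iff_aux S i i.natAbs (i.natAbs + 1) 1 (by omega)]
  constructor
  · rintro ⟨e, h1e, hee, hmod, c, hc, hcS, hci, hc1⟩
    refine ⟨c, hcS, hci, hc1, ?_⟩
    have hedvd : e ∣ i.natAbs := Nat.dvd_of_mod_eq_zero hmod
    have hdvd_i : ∀ m : Nat, m ∣ i.natAbs → (m : Int) ∣ i := fun m hm =>
      Int.dvd_natAbs.mp (Int.natCast_dvd_natCast.mpr hm)
    simp only [pvCands, List.mem_cons, List.not_mem_nil, or_false] at hc
    rcases hc with rfl | rfl | rfl | rfl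
    · exact hdvd_i e hedvd
    · exact (Int.neg_dvd).mpr (hdvd_i e hedvd)
    · exact hdvd_i _ (Nat.div_dvd_of_dvd hedvd)
    · exact (Int.neg_dvd).mpr (hdvd_i _ (Nat.div_dvd_of_dvd hedvd))
  · rintro ⟨j, hjS, hji, hj1, hjdvd⟩
    have hj0 : j ≠ 0 := fun h => hi (by simpa [h] using hjdvd)
    have hmpos : 0 < j.natAbs := Int.natAbs_pos.mpr hj0
    have hmdvd : j.natAbs ∣ i.natAbs := Int.natAbs_dvd_natAbs.mpr hjdvd
    have hmn : j.natAbs ≤ i.natAbs := Nat.le_of_dvd hnpos hmdvd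
    have hjcases : j = (j.natAbs : Int) ∨ j = -(j.natAbs : Int) := Int.natAbs_eq j
    by_cases hsq : j.natAbs * j.natAbs ≤ i.natAbs
    · refine ⟨j.natAbs, hmpos, hsq, Nat.mod_eq_zero_of_dvd hmdvd, j, ?_, hjS, hji, hj1⟩
      simp only [pvCands, List.mem_cons]
      rcases hjcases with hc | hc
      · exact Or.inl hc
      · exact Or.inr (Or.inl hc)
    · have hmul : i.natAbs / j.natAbs * j.natAbs = i.natAbs := Nat.div_mul_cancel hmdvd
      have hlt : i.natAbs / j.natAbs < j.natAbs := by
        by_contra hge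
        have hge' := Nat.le_of_not_lt hge
        exact hsq (le_trans (Nat.mul_le_mul hge' (le_refl j.natAbs)) hmul.le)
      refine ⟨i.natAbs / j.natAbs, (Nat.one_le_div_iff hmpos).mpr hmn, ?_,
        Nat.mod_eq_zero_of_dvd (Nat.div_dvd_of_dvd hmdvd), j, ?_, hjS, hji, hj1⟩
      · calc i.natAbs / j.natAbs * (i.natAbs / j.natAbs)
            ≤ i.natAbs / j.natAbs * j.natAbs := Nat.mul_le_mul (le_refl _) hlt.le
          _ = i.natAbs := hmul
      · have hdd : i.natAbs / (i.natAbs / j.natAbs) = j.natAbs := Nat.div_div_self hmdvd (by omega)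
        simp only [pvCands, List.mem_cons, hdd]
        rcases hjcases with hc | hc
        · exact Or.inr (Or.inr (Or.inl hc))
        · exact Or.inr (Or.inr (Or.inr (Or.inl hc)))

theorem pv_pointwise (set1 : List Int) (hpre : Pre_div_less set1) (i : Int) (hi : i ∈ set1) :
    pvPredA set1 i = pvKeep (PySem.Set.ofList set1) i := by
  by_cases hi0 : i = 0
  · subst hi0
    have hall : ∀ x ∈ set1, x = 0 := hpre hi
    unfold pvKeep
    rw [if_pos rfl]
    have hA : pvPredA set1 0 = true := by
      rw [pvPredA_iff]
      intro j hj hji _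
      exact absurd (hall j hj) hji
    have hB : (PySem.Set.ofList set1).all (fun j => j == 0 || j == 1) = true := by
      simp only [List.all_eq_true]
      intro j hj
      have := hall j ((PySem.Set.mem_ofList set1 j).mp hj)
      simp [this]
    rw [hA, hB]
  · unfold pvKeep
    rw [if_neg hi0]
    have hiff := pvLoop_iff (PySem.Set.ofList set1) i hi0
    by_cases hL : pvLoop (PySem.Set.ofList set1) i i.natAbs (i.natAbs + 1) 1 = true
    · obtain ⟨j, hjS, hji, hj1, hjdvd⟩ := hiff.mp hL
      rw [hL]
      have : pvPredA set1 i = false := by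
        rw [Bool.eq_false_iff, Ne, pvPredA_iff]
        intro h
        exact h j ((PySem.Set.mem_ofList set1 j).mp hjS) hji hj1 hjdvd
      rw [this]; rfl
    · rw [Bool.eq_false_iff.mpr hL]
      have : pvPredA set1 i = true := by
        rw [pvPredA_iff]
        intro j hj hji hj1 hjdvd
        exact hL (hiff.mpr ⟨j, (PySem.Set.mem_ofList set1 j).mpr hj, hji, hj1, hjdvd⟩)
      rw [this]; rfl

theorem pv_main (set1 : List Int) (hpre : Pre_div_less set1) :
    div_less set1 = div_less_alt set1 := by
  unfold div_less div_less_alt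
  rw [pv_ofList_filter]
  exact List.filter_congr (fun i hix =>
    pv_pointwise set1 hpre i ((PySem.Set.mem_ofList set1 i).mp hix))

-- ===== VERDICT (by name: the statement is the Claim_ definition above) =====
theorem div_less_spec : Claim_equal_div_less := by
  intro set1 _ hpre
  exact pv_main set1 hpre

theorem div_less_raises : Claim_raises_div_less := by
  unfold Claim_raises_div_less
  constructor
  · rintro set1 _ ⟨h0, x, hx, hxne⟩ hpre
    exact hxne (hpre h0 x hx)
  · exact ⟨by decide, by decide, by decide⟩

-- self-check: B's port really returns the stated value at the raise witness
theorem pvRaiseWitnessOut_ok :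
    div_less_alt pvRaiseWitness_div_less = pvRaiseWitnessOut_div_less :=
  div_less_raises.2.2.2
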